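-- pv_equiv track=rewrite | github.com/DSIMB/PATHOS | run_pathos.py | pos_to_msa_index
-- ===== SOURCE A (Python) =====
-- AA_ALPHABET = "ACDEFGHIKLMNPQRSTVWY"
--
-- def pos_to_msa_index(sequence: str, position: int) -> int:
--     """Convert protein position to MSA index (accounting for gaps)"""
--     index = 0
--     for i, aa in enumerate(sequence):
--         if aa in AA_ALPHABET:
--             index += 1
--         if index == position:
--             return i
--     return -1
-- ===== SOURCE B (Python) =====
-- AA_ALPHABET = "ACDEFGHIKLMNPQRSTVWY"
--
-- def pos_to_msa_index(sequence: str, position: int) -> int: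
--     """Convert protein position to MSA index (accounting for gaps)"""
--     idx = [i for i, aa in enumerate(sequence) if aa in AA_ALPHABET]
--     if 1 <= position <= len(idx):
--         return idx[position - 1]
--     return -1
-- ===== Notes on version B (the rewrite author's own statement) =====
-- stated objective: alternative
-- what changed: Replaces the early-terminating count-and-compare scan with building the table of non-gap indices once and doing a bounds-checked lookup of entry position-1.
-- intended difference: When position == 0 and the sequence starts with a non-residue (gap) character, A returns 0 (its equality check fires before any residue is counted); B returns -1, the intended out-of-range answer since positions are 1-based. — e.g. on pos_to_msa_index("-A", 0): A returns 0, B returns -1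
import Mathlib
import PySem

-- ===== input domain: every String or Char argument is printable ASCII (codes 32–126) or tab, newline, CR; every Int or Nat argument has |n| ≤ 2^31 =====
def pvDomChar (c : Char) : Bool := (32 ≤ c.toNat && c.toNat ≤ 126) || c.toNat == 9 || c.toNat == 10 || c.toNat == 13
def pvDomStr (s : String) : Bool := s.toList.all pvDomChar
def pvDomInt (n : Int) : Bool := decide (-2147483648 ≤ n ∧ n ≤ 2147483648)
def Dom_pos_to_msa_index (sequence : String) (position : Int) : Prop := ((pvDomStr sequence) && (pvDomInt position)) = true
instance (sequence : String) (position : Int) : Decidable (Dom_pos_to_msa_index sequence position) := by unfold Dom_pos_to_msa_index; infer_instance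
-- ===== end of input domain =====

-- B replaces A's early-terminating count-and-compare scan by building the table of
-- non-gap indices once and looking up entry position-1 (alternative decomposition, same cost).
-- On position = 0 with a leading non-residue character A returns 0 (accidental); B returns -1 (see D_ below).

-- ===== PORT A =====
def AA_ALPHABET : List Char := "ACDEFGHIKLMNPQRSTVWY".toList

-- the for-loop of A: state = index; early return i when index == position after the conditional increment
def pvLoopA (position : Int) : List (Int × Char) → Int → Int
  | [], _ => -1
  | (i, aa) :: rest, index =>
    let index' := if AA_ALPHABET.contains aa then index + 1 else index
    if index' = position then i else pvLoopA position rest index'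

def pos_to_msa_index (sequence : String) (position : Int) : Int :=
  pvLoopA position (PySem.List.enumerate sequence.toList 0) 0

-- ===== PORT B =====
def pos_to_msa_index_alt (sequence : String) (position : Int) : Int :=
  let idx := (PySem.List.enumerate sequence.toList 0).filterMap
    (fun p => if AA_ALPHABET.contains p.2 then some p.1 else none)
  if 1 ≤ position ∧ position ≤ (idx.length : Int) then
    PySem.List.pyGetD idx (position - 1) (-1)
  else -1

-- ===== PRECONDITION & SPEC =====
-- When position = 0 and the sequence starts with a non-residue character, A returns 0
-- (its equality check fires before any residue is counted); B returns -1, the intended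
-- out-of-range answer since positions are 1-based.
def D_pos_to_msa_index (sequence : String) (position : Int) : Prop :=
  position = 0 ∧
    (sequence.toList.head?.any fun c => !("ACDEFGHIKLMNPQRSTVWY".toList.contains c)) = true
instance (sequence : String) (position : Int) : Decidable (D_pos_to_msa_index sequence position) := by
  unfold D_pos_to_msa_index; infer_instance

def Spec_pos_to_msa_index (sequence : String) (position : Int) (out : Int) : Prop :=
  ¬ D_pos_to_msa_index sequence position → out = pos_to_msa_index_alt sequence position
instance (sequence : String) (position : Int) (out : Int) : Decidable (Spec_pos_to_msa_index sequence position out) := by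
  unfold Spec_pos_to_msa_index; infer_instance

def pvDiffWitness_pos_to_msa_index : String × Int := ("-A", 0)
def pvDiffWitnessOut_pos_to_msa_index : Int × Int := (0, -1)

-- ===== CLAIM (what is proved, stated in full; the proofs are below) =====
def Claim_unchanged_pos_to_msa_index : Prop := ∀ (sequence : String) (position : Int), Dom_pos_to_msa_index sequence position → Spec_pos_to_msa_index sequence position (pos_to_msa_index sequence position)
def Claim_changed_pos_to_msa_index : Prop := Dom_pos_to_msa_index (pvDiffWitness_pos_to_msa_index.1) (pvDiffWitness_pos_to_msa_index.2) ∧ D_pos_to_msa_index (pvDiffWitness_pos_to_msa_index.1) (pvDiffWitness_pos_to_msa_index.2) ∧ pos_to_msa_index (pvDiffWitness_pos_to_msa_index.1) (pvDiffWitness_pos_to_msa_index.2) = pvDiffWitnessOut_pos_to_msa_index.1 ∧ pos_to_msa_index_alt (pvDiffWitness_pos_to_msa_index.1) (pvDiffWitness_pos_to_msa_index.2) = pvDiffWitnessOut_pos_to_msa_index.2 ∧ pvDiffWitnessOut_pos_to_msa_index.1 ≠ pvDiffWitnessOut_pos_to_msa_index.2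
def Claim_exact_pos_to_msa_index : Prop := ∀ (sequence : String) (position : Int), Dom_pos_to_msa_index sequence position → D_pos_to_msa_index sequence position → pos_to_msa_index sequence position ≠ pos_to_msa_index_alt sequence position

-- ===== LEMMAS AND PROOFS =====

-- abbreviation used only in proofs: B's index table built from an enumerate list
def pvIdx (l : List (Int × Char)) : List Int :=
  l.filterMap (fun p => if AA_ALPHABET.contains p.2 then some p.1 else none)

-- A's loop, while the running count is still below position, is a lookup in the remaining table
lemma pvLoopA_eq_getD (l : List (Int × Char)) (position : Int) :
    ∀ index : Int, index < position →
      pvLoopA position l index = (pvIdx l).getD (position - index - 1).toNat (-1) := by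
  induction l with
  | nil => intro index _; simp [pvLoopA, pvIdx]
  | cons p rest ih =>
    intro index h
    obtain ⟨i, aa⟩ := p
    by_cases hc : aa ∈ AA_ALPHABET
    · by_cases he : index + 1 = position
      · subst he
        have ht : (index + 1 - index - 1).toNat = 0 := by omega
        simp [pvLoopA, pvIdx, hc]
      · have h1 : index + 1 < position := by omega
        have ht : (position - index - 1).toNat = (position - (index + 1) - 1).toNat + 1 := by omega
        have := ih (index + 1) h1
        simp only [pvIdx] at this
        simp [pvLoopA, pvIdx, hc, he, ht, this]
    · have hne : index ≠ position := by omega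
      have := ih index h
      simp only [pvIdx] at this
      simp [pvLoopA, pvIdx, hc, hne, this]

-- once the count has passed position it can never come back: the loop returns -1
lemma pvLoopA_gt (l : List (Int × Char)) (position : Int) :
    ∀ index : Int, position < index → pvLoopA position l index = -1 := by
  induction l with
  | nil => intro index _; simp [pvLoopA]
  | cons p rest ih =>
    intro index h
    obtain ⟨i, aa⟩ := p
    by_cases hc : aa ∈ AA_ALPHABET
    · have hne : index + 1 ≠ position := by omega
      simp [pvLoopA, hc, hne, ih (index + 1) (by omega)]
    · have hne : index ≠ position := by omega
      simp [pvLoopA, hc, hne, ih index h]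

-- ===== VERDICT (by name: the statement is the Claim_ definition above) =====
theorem pos_to_msa_index_spec : Claim_unchanged_pos_to_msa_index := by
  unfold Claim_unchanged_pos_to_msa_index
  intro sequence position _ hD
  unfold pos_to_msa_index pos_to_msa_index_alt
  set l := PySem.List.enumerate sequence.toList 0 with hl
  set idx := pvIdx l with hidx
  show pvLoopA position l 0 =
    if 1 ≤ position ∧ position ≤ ((pvIdx l).length : Int) then
      PySem.List.pyGetD (pvIdx l) (position - 1) (-1)
    else -1
  rcases lt_trichotomy position 0 with hneg | hzero | hpos
  · -- negative position: loop never matches, B's range check fails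
    rw [pvLoopA_gt l position 0 hneg]
    have : ¬ (1 ≤ position ∧ position ≤ ((pvIdx l).length : Int)) := by omega
    simp [this]
  · -- position = 0 outside D_: sequence empty or first char is a residue
    subst hzero
    have hif : ¬ ((1:Int) ≤ 0 ∧ (0:Int) ≤ ((pvIdx l).length : Int)) := by omega
    rw [if_neg hif]
    cases hs : sequence.toList with
    | nil => simp [hl, hs, pvLoopA]
    | cons c rest =>
      have hcres : AA_ALPHABET.contains c = true := by
        by_contra hno
        apply hD
        refine ⟨rfl, ?_⟩
        simp [hs, AA_ALPHABET] at hno ⊢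
        simpa using hno
      have hcons : l = (0, c) :: PySem.List.enumerate rest 1 := by
        simp [hl, hs, PySem.List.enumerate_cons]
      rw [hcons]
      simp only [pvLoopA, hcres]
      norm_num
      exact pvLoopA_gt _ 0 1 (by omega)
  · -- position ≥ 1: both sides are the lookup of entry position-1
    rw [pvLoopA_eq_getD l position 0 hpos]
    by_cases hrange : position ≤ ((pvIdx l).length : Int)
    · rw [if_pos ⟨by omega, hrange⟩]
      have h0 : (0:Int) ≤ position - 1 := by omega
      have h1 : position - 1 < ((pvIdx l).length : Int) := by omega
      rw [PySem.List.pyGetD_eq_getElem (pvIdx l) (-1) h0 h1]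
      have hlt : (position - 0 - 1).toNat < (pvIdx l).length := by omega
      rw [List.getD_eq_getElem _ _ hlt]
      congr 1
      omega
    · rw [if_neg (by omega : ¬ (1 ≤ position ∧ position ≤ ((pvIdx l).length : Int)))]
      apply List.getD_eq_default
      omega

theorem pos_to_msa_index_changed : Claim_changed_pos_to_msa_index := by
  unfold Claim_changed_pos_to_msa_index; decide

theorem pos_to_msa_index_tight : Claim_exact_pos_to_msa_index := by
  unfold Claim_exact_pos_to_msa_index
  intro sequence position _ hD
  obtain ⟨hp, hhead⟩ := hD
  subst hp
  cases hs : sequence.toList with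
  | nil => simp [hs] at hhead
  | cons c rest =>
    have hcgap : AA_ALPHABET.contains c = false := by
      rw [hs] at hhead
      simp [AA_ALPHABET] at hhead ⊢
      simpa using hhead
    have hA : pos_to_msa_index sequence 0 = 0 := by
      unfold pos_to_msa_index
      rw [hs, PySem.List.enumerate_cons]
      simp only [pvLoopA, hcgap]
      norm_num
    have hB : pos_to_msa_index_alt sequence 0 = -1 := by
      unfold pos_to_msa_index_alt
      rw [if_neg (by omega : ¬ ((1:Int) ≤ 0 ∧ (0:Int) ≤ _))]
    rw [hA, hB]; decide
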